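-- pv_equiv track=rewrite | github.com/amanda-huynh/Programming-Methology | crypto.py | key_slug
-- ===== SOURCE A (Python) =====
-- ALPHABET = ['a', 'b', 'c', 'd', 'e', 'f', 'g', 'h', 'i', 'j', 'k', 'l', 'm', 'n', 'o', 'p', 'q', 'r', 's', 't', 'u', 'v', 'w', 'x', 'y', 'z']
--
-- def key_slug(key):
--     """
--     Given a key string, return the len-26 slug list for it.
--     >>> key_slug('z')
--     ['z', 'a', 'b', 'c', 'd', 'e', 'f', 'g', 'h', 'i', 'j', 'k', 'l', 'm', 'n', 'o', 'p', 'q', 'r', 's', 't', 'u', 'v', 'w', 'x', 'y']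
--     >>> key_slug('Bananas!')
--     ['b', 'a', 'n', 's', 'c', 'd', 'e', 'f', 'g', 'h', 'i', 'j', 'k', 'l', 'm', 'o', 'p', 'q', 'r', 't', 'u', 'v', 'w', 'x', 'y', 'z']
--     >>> key_slug('Life, Liberty, and')
--     ['l', 'i', 'f', 'e', 'b', 'r', 't', 'y', 'a', 'n', 'd', 'c', 'g', 'h', 'j', 'k', 'm', 'o', 'p', 'q', 's', 'u', 'v', 'w', 'x', 'z']
--     >>> key_slug('Zounds!')
--     ['z', 'o', 'u', 'n', 'd', 's', 'a', 'b', 'c', 'e', 'f', 'g', 'h', 'i', 'j', 'k', 'l', 'm', 'p', 'q', 'r', 't', 'v', 'w', 'x', 'y']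
--     """
--     lowercase_key = key.lower()
--     result = []
--     copy_alphabet = list(ALPHABET) #make copy of alphabet
--     for i in range(len(lowercase_key)):
--         # return a char if it is not already in result and it is a letter, then remove every other instance of
--         # the char from the copy of the alphabet
--         if not lowercase_key[i] in result and lowercase_key[i].isalpha():
--             result += lowercase_key[i]
--             copy_alphabet.remove(lowercase_key[i])
--     result += copy_alphabet
--     return result
-- ===== SOURCE B (Python) =====
-- ALPHABET = ['a', 'b', 'c', 'd', 'e', 'f', 'g', 'h', 'i', 'j', 'k', 'l', 'm', 'n', 'o', 'p', 'q', 'r', 's', 't', 'u', 'v', 'w', 'x', 'y', 'z']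
--
-- def key_slug(key):
--     prefix = []
--     for ch in key.lower():
--         if ch.isalpha() and ch not in prefix:
--             prefix.append(ch)
--     return prefix + [c for c in ALPHABET if c not in prefix]
-- ===== Notes on version B (the rewrite author's own statement) =====
-- stated objective: simpler
-- what changed: B builds the deduplicated key prefix in one pass and then appends the unused letters by filtering the fixed ALPHABET, instead of A's mechanism of maintaining a mutable alphabet copy and calling .remove inside the loop.
import Mathlib
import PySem

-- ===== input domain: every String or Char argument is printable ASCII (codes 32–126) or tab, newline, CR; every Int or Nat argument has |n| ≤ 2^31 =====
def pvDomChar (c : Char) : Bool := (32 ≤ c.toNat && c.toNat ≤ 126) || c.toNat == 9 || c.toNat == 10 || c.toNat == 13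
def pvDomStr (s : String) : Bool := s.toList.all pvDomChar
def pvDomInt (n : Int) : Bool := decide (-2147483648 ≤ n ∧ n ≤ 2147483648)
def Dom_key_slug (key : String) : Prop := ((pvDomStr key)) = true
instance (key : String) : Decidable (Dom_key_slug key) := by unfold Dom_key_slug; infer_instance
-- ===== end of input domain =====

-- B builds the deduplicated key prefix first and then filters the fixed alphabet for the
-- unused letters, instead of A's in-loop .remove on a mutable alphabet copy; objective: simpler.


-- ===== PORT A =====
def alphabetChars : List Char :=
  ['a','b','c','d','e','f','g','h','i','j','k','l','m','n','o','p','q','r','s','t','u','v','w','x','y','z']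

-- loop body of A: grow result, remove the used letter from the alphabet copy
-- (remove? never fails when the guard holds — proved below; the .getD default is dead code)
def keySlugStepA (st : List Char × List Char) (c : Char) : List Char × List Char :=
  if c ∉ st.1 ∧ PySem.Chars.isalpha c = true then
    (st.1 ++ [c], (PySem.List.remove? st.2 c).getD st.2)
  else st

def key_slug (key : String) : List String :=
  let lk := (PySem.Str.lower key).toList
  let st := lk.foldl keySlugStepA ([], alphabetChars)
  (st.1 ++ st.2).map (fun c => String.ofList [c])

-- ===== PORT B =====
-- loop body of B: collect the deduplicated alphabetic key prefix
def keySlugStepB (acc : List Char) (c : Char) : List Char :=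
  if PySem.Chars.isalpha c = true ∧ c ∉ acc then acc ++ [c] else acc

def key_slug_alt (key : String) : List String :=
  let p := (PySem.Str.lower key).toList.foldl keySlugStepB []
  (p ++ alphabetChars.filter (fun c => c ∉ p)).map (fun c => String.ofList [c])

-- ===== PRECONDITION & SPEC =====
def Spec_key_slug (key : String) (out : List String) : Prop := out = key_slug_alt key
instance (key : String) (out : List String) : Decidable (Spec_key_slug key out) := by unfold Spec_key_slug; infer_instance

-- ===== CLAIM (what is proved, stated in full; the proofs are below) =====
def Claim_equal_key_slug : Prop := ∀ (key : String), Dom_key_slug key → Spec_key_slug key (key_slug key)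

-- ===== LEMMAS AND PROOFS =====

lemma char_toNat_le {a b : Char} (h : a ≤ b) : a.toNat ≤ b.toNat := by
  rw [Char.le_def, UInt32.le_iff_toNat_le] at h; exact h

lemma mem_alphabet (d : Char) (h1 : 97 ≤ d.toNat) (h2 : d.toNat ≤ 122) : d ∈ alphabetChars := by
  have hd : Char.ofNat d.toNat = d := Char.ofNat_toNat d
  set n := d.toNat with hn
  rw [← hd]
  interval_cases n <;> decide

lemma lower_alpha_mem (c : Char) (h : PySem.Chars.isalpha (PySem.Chars.lowerChar c) = true) :
    PySem.Chars.lowerChar c ∈ alphabetChars := by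
  by_cases hu : PySem.Chars.isupper c = true
  · have hb := hu
    unfold PySem.Chars.isupper at hb
    simp only [Bool.and_eq_true, decide_eq_true_iff] at hb
    have h1 : 65 ≤ c.toNat := char_toNat_le hb.1
    have h2 : c.toNat ≤ 90 := char_toNat_le hb.2
    have hv : (c.toNat + 32).isValidChar := Or.inl (by omega)
    have ht : (Char.ofNat (c.toNat + 32)).toNat = c.toNat + 32 := by
      rw [Char.toNat_ofNat, if_pos hv]
    have he : PySem.Chars.lowerChar c = Char.ofNat (c.toNat + 32) := by
      unfold PySem.Chars.lowerChar
      rw [if_pos hu]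
    rw [he]
    exact mem_alphabet _ (by omega) (by omega)
  · have he : PySem.Chars.lowerChar c = c := by
      unfold PySem.Chars.lowerChar; rw [if_neg hu]
    rw [he] at h ⊢
    unfold PySem.Chars.isalpha at h
    rw [Bool.or_eq_true] at h
    rcases h with h | h
    · exact absurd h hu
    · unfold PySem.Chars.islower at h
      simp only [Bool.and_eq_true, decide_eq_true_iff] at h
      exact mem_alphabet _ (char_toNat_le h.1) (char_toNat_le h.2)

lemma alphabet_nodup : alphabetChars.Nodup := by decide

-- erasing c from the still-unused letters = filtering against result ++ [c]
lemma erase_filter (l : List Char) (res : List Char) (c : Char) (hn : l.Nodup) :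
    (l.filter (fun x => x ∉ res)).erase c = l.filter (fun x => x ∉ res ++ [c]) := by
  induction l with
  | nil => simp
  | cons a t ih =>
    have hnt : t.Nodup := hn.of_cons
    rw [List.filter_cons, List.filter_cons]
    by_cases har : a ∈ res
    · have d1 : decide (a ∉ res) = false := by simp [har]
      have d2 : decide (a ∉ res ++ [c]) = false := by simp [List.mem_append, har]
      rw [d1, d2]
      simp only [Bool.false_eq_true, if_false]
      exact ih hnt
    · by_cases hac : a = c
      · subst hac
        have hat : a ∉ t := (List.nodup_cons.mp hn).1
        have d1 : decide (a ∉ res) = true := by simp [har]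
        have d2 : decide (a ∉ res ++ [a]) = false := by simp
        rw [d1, d2]
        simp only [if_true, Bool.false_eq_true, if_false]
        rw [List.erase_cons_head]
        refine List.filter_congr ?_
        intro x hx
        have hxa : x ≠ a := fun h => hat (h ▸ hx)
        simp [List.mem_append, hxa]
      · have d1g : (a ∉ res) = (a ∉ res ++ [c]) := by simp [List.mem_append, har, hac]
        by_cases hin : a ∉ res
        · have d1 : decide (a ∉ res) = true := by simp [hin]
          have d2 : decide (a ∉ res ++ [c]) = true := by simp [List.mem_append, har, hac]
          rw [d1, d2]
          simp only [if_true]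
          rw [List.erase_cons_tail (by simp [hac]), ih hnt]
        · exact absurd har (by simpa using hin)

-- the loop invariant: A's pair state is (B's accumulator, alphabet filtered by it)
lemma loop_eq (l : List Char) (res : List Char)
    (hl : ∀ c ∈ l, PySem.Chars.isalpha c = true → c ∈ alphabetChars) :
    l.foldl keySlugStepA (res, alphabetChars.filter (fun x => x ∉ res))
      = (l.foldl keySlugStepB res,
         alphabetChars.filter (fun x => x ∉ l.foldl keySlugStepB res)) := by
  induction l generalizing res with
  | nil => simp
  | cons c t ih =>
    have hc := hl c (List.mem_cons_self ..)
    have ht : ∀ x ∈ t, PySem.Chars.isalpha x = true → x ∈ alphabetChars :=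
      fun x hx => hl x (List.mem_cons_of_mem _ hx)
    simp only [List.foldl_cons]
    by_cases hg : c ∉ res ∧ PySem.Chars.isalpha c = true
    · have halpha := hg.2
      have hmem : c ∈ alphabetChars := hc halpha
      have hcf : c ∈ alphabetChars.filter (fun x => x ∉ res) := by
        simp [List.mem_filter, hmem, hg.1]
      have hA : keySlugStepA (res, alphabetChars.filter (fun x => x ∉ res)) c
            = (res ++ [c], alphabetChars.filter (fun x => x ∉ res ++ [c])) := by
        unfold keySlugStepA
        rw [if_pos hg]
        dsimp only
        rw [PySem.List.remove?_eq_some_erase _ c hcf]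
        simp only [Option.getD_some]
        rw [erase_filter _ _ _ alphabet_nodup]
      have hB : keySlugStepB res c = res ++ [c] := by
        unfold keySlugStepB; rw [if_pos ⟨halpha, hg.1⟩]
      rw [hA]
      simp only [hB]
      exact ih (res ++ [c]) ht
    · have hA : keySlugStepA (res, alphabetChars.filter (fun x => x ∉ res)) c
            = (res, alphabetChars.filter (fun x => x ∉ res)) := by
        unfold keySlugStepA; rw [if_neg hg]
      have hB : keySlugStepB res c = res := by
        unfold keySlugStepB
        rw [if_neg (fun h => hg ⟨h.2, h.1⟩)]
      rw [hA]
      simp only [hB]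
      exact ih res ht

-- ===== VERDICT (by name: the statement is the Claim_ definition above) =====
theorem key_slug_spec : Claim_equal_key_slug := by
  intro key _
  unfold Spec_key_slug key_slug key_slug_alt
  have hl : ∀ c ∈ (PySem.Str.lower key).toList,
      PySem.Chars.isalpha c = true → c ∈ alphabetChars := by
    intro c hcmem halpha
    rw [PySem.Str.toList_lower] at hcmem
    unfold PySem.Chars.lower at hcmem
    obtain ⟨c', _, rfl⟩ := List.mem_map.mp hcmem
    exact lower_alpha_mem c' halpha
  dsimp only
  have h0 : ((([] : List Char), alphabetChars) : List Char × List Char)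
      = ([], alphabetChars.filter (fun x => x ∉ ([] : List Char))) := by simp
  rw [h0, loop_eq _ [] hl]
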